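-- pv_equiv track=rewrite | github.com/relikd/appchk-web | src/lib_common.py | try_del
-- ===== SOURCE A (Python) =====
-- def try_del(index, keys):
--     did_change = False
--     for x in keys:
--         try:
--             del(index[x])
--             did_change = True
--         except KeyError:
--             pass
--     return did_change
-- ===== SOURCE B (Python) =====
-- def try_del(index, keys):
--     doomed = set(keys)
--     kept = {k: v for k, v in index.items() if k not in doomed}
--     changed = len(kept) != len(index)
--     index.clear()
--     index.update(kept)
--     return changed
-- ===== Notes on version B (the rewrite author's own statement) =====
-- stated objective: alternative
-- what changed: Instead of A's per-key delete loop with try/except over keys, B traverses the dict once, rebuilding it without the doomed keys (a dict comprehension filtered against set(keys)) and reports change by comparing the sizes before and after.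
import Mathlib
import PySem

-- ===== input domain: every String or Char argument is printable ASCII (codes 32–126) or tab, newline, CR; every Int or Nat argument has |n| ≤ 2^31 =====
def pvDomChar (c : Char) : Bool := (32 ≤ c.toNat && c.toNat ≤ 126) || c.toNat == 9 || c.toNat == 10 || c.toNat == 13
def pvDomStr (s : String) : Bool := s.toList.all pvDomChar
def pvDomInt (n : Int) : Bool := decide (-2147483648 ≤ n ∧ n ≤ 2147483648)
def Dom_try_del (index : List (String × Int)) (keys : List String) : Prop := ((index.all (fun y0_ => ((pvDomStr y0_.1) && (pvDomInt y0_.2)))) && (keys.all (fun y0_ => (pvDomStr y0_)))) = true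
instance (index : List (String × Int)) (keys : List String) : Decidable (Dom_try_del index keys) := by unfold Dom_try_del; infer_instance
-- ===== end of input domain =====

-- B rebuilds the dict by one traversal of index.items() filtered against set(keys) and compares
-- sizes, instead of A's per-key delete loop (objective: alternative). Both Pythons leave `index`
-- holding the same final mapping; the theorem is about the return value.

-- ===== PORT A =====
-- A: loop over keys; `del index[x]` succeeds (and sets the flag) iff x is present, else KeyError caught.
def try_del (index : List (String × Int)) (keys : List String) : Bool :=
  (keys.foldl
    (fun (st : PySem.Dict String Int × Bool) x =>
      match st.1.get? x with
      | some _ => (st.1.erase x, true)   -- del succeeds, did_change = True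
      | none => st)                      -- KeyError: pass
    (PySem.Dict.ofList index, false)).2

-- ===== PORT B =====
-- B: doomed = set(keys); kept = filtered items; changed = len(kept) != len(index).
-- (Source B's clear/update only restores the argument's mutation; the return value never reads
-- its result, so it is omitted here — the claim is about the return value.)
def try_del_alt (index : List (String × Int)) (keys : List String) : Bool :=
  let doomed : PySem.Set String := PySem.Set.ofList keys
  let d := PySem.Dict.ofList index
  let kept := d.items.filter (fun p => !(PySem.Set.contains doomed p.1))
  kept.length != d.items.length

-- ===== PRECONDITION & SPEC =====
def Spec_try_del (index : List (String × Int)) (keys : List String) (out : Bool) : Prop := out = try_del_alt index keys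
instance (index : List (String × Int)) (keys : List String) (out : Bool) : Decidable (Spec_try_del index keys out) := by unfold Spec_try_del; infer_instance

-- ===== CLAIM (what is proved, stated in full; the proofs are below) =====
def Claim_equal_try_del : Prop := ∀ (index : List (String × Int)) (keys : List String), Dom_try_del index keys → Spec_try_del index keys (try_del index keys)

-- ===== LEMMAS AND PROOFS =====

-- once A's flag is true it stays true
theorem pv_flag_mono (keys : List String) (d : PySem.Dict String Int) :
    (keys.foldl
      (fun (st : PySem.Dict String Int × Bool) x =>
        match st.1.get? x with
        | some _ => (st.1.erase x, true)
        | none => st)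
      (d, true)).2 = true := by
  induction keys generalizing d with
  | nil => rfl
  | cons x ks ih =>
    simp only [List.foldl]
    cases h : d.get? x with
    | some v => exact ih _
    | none => exact ih _

-- A's flag = "some key of keys is present in the starting dict"
theorem pv_fold_flag (keys : List String) (d : PySem.Dict String Int) :
    (keys.foldl
      (fun (st : PySem.Dict String Int × Bool) x =>
        match st.1.get? x with
        | some _ => (st.1.erase x, true)
        | none => st)
      (d, false)).2 = keys.any (fun x => d.contains x) := by
  induction keys generalizing d with
  | nil => rfl
  | cons x ks ih =>
    simp only [List.foldl, List.any_cons]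
    cases h : d.get? x with
    | some v =>
      have hc : d.contains x = true := by
        rw [PySem.Dict.contains_eq_isSome_get?, h]; rfl
      simp only [hc, Bool.true_or]
      exact pv_flag_mono ks (d.erase x)
    | none =>
      have hc : d.contains x = false := by
        rw [PySem.Dict.contains_eq_isSome_get?, h]; rfl
      simp only [hc, Bool.false_or]
      exact ih d

-- B's flag: the filtered items list is shorter iff some key of keys is present in d
theorem pv_alt_flag (keys : List String) (d : PySem.Dict String Int) :
    ((d.items.filter (fun p => !(PySem.Set.contains (PySem.Set.ofList keys) p.1))).length
        != d.items.length)
      = keys.any (fun x => d.contains x) := by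
  cases h : keys.any (fun x => d.contains x) with
  | true =>
    rw [List.any_eq_true] at h
    obtain ⟨x, hx, hc⟩ := h
    rw [PySem.Dict.contains_iff_mem_keys] at hc
    simp only [PySem.Dict.keys, List.mem_map] at hc
    obtain ⟨p, hp, hpx⟩ := hc
    have hlt : (d.items.filter (fun p => !(PySem.Set.contains (PySem.Set.ofList keys) p.1))).length
        < d.items.length := by
      apply List.length_filter_lt_length_iff_exists.mpr
      refine ⟨p, hp, ?_⟩
      simp [PySem.Set.mem_ofList, hpx, hx]
    exact bne_iff_ne.mpr (Nat.ne_of_lt hlt)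
  | false =>
    rw [List.any_eq_false] at h
    have : d.items.filter (fun p => !(PySem.Set.contains (PySem.Set.ofList keys) p.1)) = d.items := by
      apply List.filter_eq_self.mpr
      intro p hp
      have hnk : p.1 ∉ keys := by
        intro hk
        have := h p.1 hk
        rw [PySem.Dict.contains_iff_mem_keys] at this
        exact this (by simp only [PySem.Dict.keys, List.mem_map]; exact ⟨p, hp, rfl⟩)
      simp [PySem.Set.mem_ofList, hnk]
    rw [this, bne_self_eq_false]

-- ===== VERDICT (by name: the statement is the Claim_ definition above) =====
theorem try_del_spec : Claim_equal_try_del := by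
  intro index keys _
  unfold Spec_try_del try_del try_del_alt
  rw [pv_fold_flag, pv_alt_flag]
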